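-- pv_equiv track=rewrite | github.com/ognjhunt/BlueprintRecipe | replicator-job/generate_replicator_bundle.py | detect_environment_type
-- ===== SOURCE A (Python) =====
-- from enum import Enum
--
-- class EnvironmentType(str, Enum):
--     KITCHEN = "kitchen"
--     GROCERY = "grocery"
--     WAREHOUSE = "warehouse"
--     LOADING_DOCK = "loading_dock"
--     LAB = "lab"
--     OFFICE = "office"
--     UTILITY_ROOM = "utility_room"
--     HOME_LAUNDRY = "home_laundry"
--     BEDROOM = "bedroom"
--     LIVING_ROOM = "living_room"
--     BATHROOM = "bathroom"
--     GENERIC = "generic"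
--
-- SCENE_TYPE_TO_ENVIRONMENT = {
--     "kitchen": EnvironmentType.KITCHEN,
--     "grocery": EnvironmentType.GROCERY,
--     "warehouse": EnvironmentType.WAREHOUSE,
--     "loading_dock": EnvironmentType.LOADING_DOCK,
--     "lab": EnvironmentType.LAB,
--     "office": EnvironmentType.OFFICE,
--     "utility_room": EnvironmentType.UTILITY_ROOM,
--     "laundry": EnvironmentType.HOME_LAUNDRY,
--     "laundry_room": EnvironmentType.HOME_LAUNDRY,
--     "bedroom": EnvironmentType.BEDROOM,
--     "living_room": EnvironmentType.LIVING_ROOM,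
--     "bathroom": EnvironmentType.BATHROOM,
-- }
--
-- def detect_environment_type(scene_type: str, inventory: dict) -> EnvironmentType:
--     scene_type_lower = scene_type.lower().strip()
--     if scene_type_lower in SCENE_TYPE_TO_ENVIRONMENT:
--         return SCENE_TYPE_TO_ENVIRONMENT[scene_type_lower]
--
--     objects = inventory.get("objects", [])
--     object_ids = {obj.get("id", "").lower() for obj in objects}
--
--     if any(keyword in oid for keyword in ["refrigerator", "oven", "dishwasher"] for oid in object_ids):
--         return EnvironmentType.KITCHEN
--     if any(keyword in oid for keyword in ["washer", "dryer", "hamper"] for oid in object_ids):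
--         return EnvironmentType.HOME_LAUNDRY
--     if any(keyword in oid for keyword in ["pallet", "racking", "forklift"] for oid in object_ids):
--         return EnvironmentType.WAREHOUSE
--     if any("bed" in oid or "dresser" in oid for oid in object_ids):
--         return EnvironmentType.BEDROOM
--     if any("lab" in oid or "bench" in oid or "microscope" in oid for oid in object_ids):
--         return EnvironmentType.LAB
--
--     return EnvironmentType.GENERIC
-- ===== SOURCE B (Python) =====
-- from enum import Enum
--
-- class EnvironmentType(str, Enum):
--     KITCHEN = "kitchen"
--     GROCERY = "grocery"
--     WAREHOUSE = "warehouse"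
--     LOADING_DOCK = "loading_dock"
--     LAB = "lab"
--     OFFICE = "office"
--     UTILITY_ROOM = "utility_room"
--     HOME_LAUNDRY = "home_laundry"
--     BEDROOM = "bedroom"
--     LIVING_ROOM = "living_room"
--     BATHROOM = "bathroom"
--     GENERIC = "generic"
--
-- SCENE_TYPE_TO_ENVIRONMENT = {
--     "kitchen": EnvironmentType.KITCHEN,
--     "grocery": EnvironmentType.GROCERY,
--     "warehouse": EnvironmentType.WAREHOUSE,
--     "loading_dock": EnvironmentType.LOADING_DOCK,
--     "lab": EnvironmentType.LAB,
--     "office": EnvironmentType.OFFICE,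
--     "utility_room": EnvironmentType.UTILITY_ROOM,
--     "laundry": EnvironmentType.HOME_LAUNDRY,
--     "laundry_room": EnvironmentType.HOME_LAUNDRY,
--     "bedroom": EnvironmentType.BEDROOM,
--     "living_room": EnvironmentType.LIVING_ROOM,
--     "bathroom": EnvironmentType.BATHROOM,
-- }
--
-- # Flat keyword index: substring -> (priority, environment), priorities ascending
-- # (0 = strongest evidence). Correct because "first matching rule group" in the
-- # original staged checks equals "minimum priority over all keyword hits".
-- KEYWORD_INDEX = {
--     "refrigerator": (0, EnvironmentType.KITCHEN),
--     "oven": (0, EnvironmentType.KITCHEN),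
--     "dishwasher": (0, EnvironmentType.KITCHEN),
--     "washer": (1, EnvironmentType.HOME_LAUNDRY),
--     "dryer": (1, EnvironmentType.HOME_LAUNDRY),
--     "hamper": (1, EnvironmentType.HOME_LAUNDRY),
--     "pallet": (2, EnvironmentType.WAREHOUSE),
--     "racking": (2, EnvironmentType.WAREHOUSE),
--     "forklift": (2, EnvironmentType.WAREHOUSE),
--     "bed": (3, EnvironmentType.BEDROOM),
--     "dresser": (3, EnvironmentType.BEDROOM),
--     "lab": (4, EnvironmentType.LAB),
--     "bench": (4, EnvironmentType.LAB),
--     "microscope": (4, EnvironmentType.LAB),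
-- }
--
-- def detect_environment_type(scene_type: str, inventory: dict) -> EnvironmentType:
--     scene_type_lower = scene_type.lower().strip()
--     env = SCENE_TYPE_TO_ENVIRONMENT.get(scene_type_lower)
--     if env is not None:
--         return env
--     # Single streaming pass over the objects, keeping the best (lowest-priority)
--     # keyword hit seen so far; no object-id set, no staged per-group re-scans.
--     best = None  # (priority, environment)
--     for obj in inventory.get("objects", []):
--         oid = obj.get("id", "").lower()
--         for kw, hit in KEYWORD_INDEX.items():
--             if kw in oid and (best is None or hit[0] < best[0]):
--                 best = hit
--     return best[1] if best is not None else EnvironmentType.GENERIC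
-- ===== Notes on version B (the rewrite author's own statement) =====
-- stated objective: alternative
-- what changed: B replaces A's set construction plus five staged per-group any-scans by one flat keyword->(priority,environment) index and a single streaming pass over the objects that keeps the minimum-priority keyword hit seen so far, returning its environment.
import Mathlib
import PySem

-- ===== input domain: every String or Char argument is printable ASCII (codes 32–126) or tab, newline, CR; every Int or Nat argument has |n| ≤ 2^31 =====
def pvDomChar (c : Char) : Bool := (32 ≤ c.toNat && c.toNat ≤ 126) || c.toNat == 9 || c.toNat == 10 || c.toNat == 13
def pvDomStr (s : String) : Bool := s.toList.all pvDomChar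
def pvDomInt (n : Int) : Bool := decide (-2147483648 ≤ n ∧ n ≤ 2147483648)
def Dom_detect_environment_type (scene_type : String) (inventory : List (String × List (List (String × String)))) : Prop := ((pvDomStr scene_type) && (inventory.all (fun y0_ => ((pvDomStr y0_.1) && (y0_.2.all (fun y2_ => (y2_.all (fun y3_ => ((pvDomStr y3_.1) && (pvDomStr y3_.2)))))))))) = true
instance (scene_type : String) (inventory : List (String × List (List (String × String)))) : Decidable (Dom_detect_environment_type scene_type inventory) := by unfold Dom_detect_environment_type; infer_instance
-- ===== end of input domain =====

-- B replaces A's id set plus five staged per-group scans by one flat keyword index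
-- and a single streaming pass keeping the minimum-priority keyword hit (alternative).

-- ===== PORT A =====
def pvScene2Env : List (String × String) :=
  [("kitchen", "kitchen"), ("grocery", "grocery"), ("warehouse", "warehouse"),
   ("loading_dock", "loading_dock"), ("lab", "lab"), ("office", "office"),
   ("utility_room", "utility_room"), ("laundry", "home_laundry"),
   ("laundry_room", "home_laundry"), ("bedroom", "bedroom"),
   ("living_room", "living_room"), ("bathroom", "bathroom")]

-- 'key in dict' followed by 'dict[key]' is ported as one get? match (first branch = hit).
def detect_environment_type (scene_type : String) (inventory : List (String × List (List (String × String)))) : String :=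
  let scene_type_lower := PySem.Str.strip (PySem.Str.lower scene_type)
  match (PySem.Dict.mk pvScene2Env).get? scene_type_lower with
  | some env => env
  | none =>
    let objects := (PySem.Dict.mk inventory).getD "objects" []
    let object_ids : PySem.Set String :=
      PySem.Set.ofList (objects.map (fun obj => PySem.Str.lower ((PySem.Dict.mk obj).getD "id" "")))
    if ["refrigerator", "oven", "dishwasher"].any (fun k => object_ids.any (fun oid => PySem.Str.isIn k oid)) then
      "kitchen"
    else if ["washer", "dryer", "hamper"].any (fun k => object_ids.any (fun oid => PySem.Str.isIn k oid)) then
      "home_laundry"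
    else if ["pallet", "racking", "forklift"].any (fun k => object_ids.any (fun oid => PySem.Str.isIn k oid)) then
      "warehouse"
    else if object_ids.any (fun oid => PySem.Str.isIn "bed" oid || PySem.Str.isIn "dresser" oid) then
      "bedroom"
    else if object_ids.any (fun oid => PySem.Str.isIn "lab" oid || PySem.Str.isIn "bench" oid || PySem.Str.isIn "microscope" oid) then
      "lab"
    else
      "generic"

-- ===== PORT B =====
-- Flat keyword index kw -> (priority, environment), priorities ascending.
def pvKeywordIndex : List (String × Nat × String) :=
  [("refrigerator", 0, "kitchen"), ("oven", 0, "kitchen"), ("dishwasher", 0, "kitchen"),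
   ("washer", 1, "home_laundry"), ("dryer", 1, "home_laundry"), ("hamper", 1, "home_laundry"),
   ("pallet", 2, "warehouse"), ("racking", 2, "warehouse"), ("forklift", 2, "warehouse"),
   ("bed", 3, "bedroom"), ("dresser", 3, "bedroom"),
   ("lab", 4, "lab"), ("bench", 4, "lab"), ("microscope", 4, "lab")]

def detect_environment_type_alt (scene_type : String) (inventory : List (String × List (List (String × String)))) : String :=
  let scene_type_lower := PySem.Str.strip (PySem.Str.lower scene_type)
  match (PySem.Dict.mk pvScene2Env).get? scene_type_lower with
  | some env => env
  | none =>
    let best := ((PySem.Dict.mk inventory).getD "objects" []).foldl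
      (fun best obj =>
        let oid := PySem.Str.lower ((PySem.Dict.mk obj).getD "id" "")
        pvKeywordIndex.foldl
          (fun best e =>
            if PySem.Str.isIn e.1 oid && (match best with | none => true | some b => decide (e.2.1 < b.1))
            then some e.2 else best)
          best)
      (none : Option (Nat × String))
    match best with
    | some b => b.2
    | none => "generic"

-- ===== PRECONDITION & SPEC =====
def Spec_detect_environment_type (scene_type : String) (inventory : List (String × List (List (String × String)))) (out : String) : Prop := out = detect_environment_type_alt scene_type inventory
instance (scene_type : String) (inventory : List (String × List (List (String × String)))) (out : String) : Decidable (Spec_detect_environment_type scene_type inventory out) := by unfold Spec_detect_environment_type; infer_instance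

-- ===== CLAIM (what is proved, stated in full; the proofs are below) =====
def Claim_equal_detect_environment_type : Prop := ∀ (scene_type : String) (inventory : List (String × List (List (String × String)))), Dom_detect_environment_type scene_type inventory → Spec_detect_environment_type scene_type inventory (detect_environment_type scene_type inventory)

-- ===== LEMMAS AND PROOFS =====

-- 'keep the smaller priority, ties to the left' as a binary operation on the accumulator.
def pvOmin (a b : Option (Nat × String)) : Option (Nat × String) :=
  match a, b with
  | none, b => b
  | some a, none => some a
  | some a, some b => if b.1 < a.1 then some b else some a

-- First-true-slot summary of the five rule groups (b0 = kitchen keywords matched, …).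
def pvF (b0 b1 b2 b3 b4 : Bool) : Option (Nat × String) :=
  if b0 then some (0, "kitchen")
  else if b1 then some (1, "home_laundry")
  else if b2 then some (2, "warehouse")
  else if b3 then some (3, "bedroom")
  else if b4 then some (4, "lab")
  else none

theorem pvStep_eq (oid : String) (acc : Option (Nat × String)) (kw : String) (p : Nat) (env : String) :
    (if PySem.Str.isIn kw oid && (match acc with | none => true | some b => decide (p < b.1))
     then some (p, env) else acc)
      = pvOmin acc (if PySem.Str.isIn kw oid then some (p, env) else none) := by
  cases acc with
  | none => cases PySem.Str.isIn kw oid <;> simp [pvOmin]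
  | some b =>
    cases PySem.Str.isIn kw oid
    · simp [pvOmin]
    · simp only [Bool.true_and, pvOmin]
      split_ifs <;> simp_all

theorem pvOmin_F (a0 a1 a2 a3 a4 b0 b1 b2 b3 b4 : Bool) :
    pvOmin (pvF a0 a1 a2 a3 a4) (pvF b0 b1 b2 b3 b4)
      = pvF (a0 || b0) (a1 || b1) (a2 || b2) (a3 || b3) (a4 || b4) := by
  revert a0 a1 a2 a3 a4 b0 b1 b2 b3 b4; decide

theorem pvF0 (b : Bool) : (if b = true then some ((0 : Nat), "kitchen") else none) = pvF b false false false false := by cases b <;> rfl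
theorem pvF1 (b : Bool) : (if b = true then some ((1 : Nat), "home_laundry") else none) = pvF false b false false false := by cases b <;> rfl
theorem pvF2 (b : Bool) : (if b = true then some ((2 : Nat), "warehouse") else none) = pvF false false b false false := by cases b <;> rfl
theorem pvF3 (b : Bool) : (if b = true then some ((3 : Nat), "bedroom") else none) = pvF false false false b false := by cases b <;> rfl
theorem pvF4 (b : Bool) : (if b = true then some ((4 : Nat), "lab") else none) = pvF false false false false b := by cases b <;> rfl

-- The inner fold over the whole keyword index summarises one id into a pvF of its five group hits.
theorem pvInner_eq (oid : String) (acc : Option (Nat × String)) :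
    pvKeywordIndex.foldl
      (fun best e =>
        if PySem.Str.isIn e.1 oid && (match best with | none => true | some b => decide (e.2.1 < b.1))
        then some e.2 else best) acc
      = pvOmin acc (pvF
          (PySem.Str.isIn "refrigerator" oid || PySem.Str.isIn "oven" oid || PySem.Str.isIn "dishwasher" oid)
          (PySem.Str.isIn "washer" oid || PySem.Str.isIn "dryer" oid || PySem.Str.isIn "hamper" oid)
          (PySem.Str.isIn "pallet" oid || PySem.Str.isIn "racking" oid || PySem.Str.isIn "forklift" oid)
          (PySem.Str.isIn "bed" oid || PySem.Str.isIn "dresser" oid)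
          (PySem.Str.isIn "lab" oid || PySem.Str.isIn "bench" oid || PySem.Str.isIn "microscope" oid)) := by
  have hassoc : ∀ a b c, pvOmin (pvOmin a b) c = pvOmin a (pvOmin b c) := by
    intro a b c
    cases a <;> cases b <;> cases c <;>
      simp only [pvOmin] <;> split_ifs <;> simp only [pvOmin] <;> split_ifs <;>
        first | rfl | omega
  simp only [pvKeywordIndex, List.foldl_cons, List.foldl_nil, pvStep_eq,
    pvF0, pvF1, pvF2, pvF3, pvF4, hassoc, pvOmin_F]
  cases acc <;> simp [pvOmin, pvF]

-- Folding pvOmin from any accumulator factors through the fold from none.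
theorem pvFoldl_omin {α : Type} (g : α → Option (Nat × String)) (l : List α) (a : Option (Nat × String)) :
    l.foldl (fun acc x => pvOmin acc (g x)) a
      = pvOmin a (l.foldl (fun acc x => pvOmin acc (g x)) none) := by
  induction l generalizing a with
  | nil => cases a <;> rfl
  | cons x t ih =>
    rw [List.foldl_cons, List.foldl_cons, ih, ih (pvOmin none (g x))]
    have hz : pvOmin none (g x) = g x := rfl
    rw [hz]
    cases a <;> cases g x <;> cases (t.foldl (fun acc x => pvOmin acc (g x)) none) <;>
      simp only [pvOmin] <;> split_ifs <;> simp only [pvOmin] <;> split_ifs <;>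
        first | rfl | omega

-- The outer fold over ids computes the pvF of the groupwise 'any id matches'.
theorem pvOuter_eq {A : Type} (f : A → String) (L : List A) :
    L.foldl (fun acc x => pvOmin acc (pvF
        (PySem.Str.isIn "refrigerator" (f x) || PySem.Str.isIn "oven" (f x) || PySem.Str.isIn "dishwasher" (f x))
        (PySem.Str.isIn "washer" (f x) || PySem.Str.isIn "dryer" (f x) || PySem.Str.isIn "hamper" (f x))
        (PySem.Str.isIn "pallet" (f x) || PySem.Str.isIn "racking" (f x) || PySem.Str.isIn "forklift" (f x))
        (PySem.Str.isIn "bed" (f x) || PySem.Str.isIn "dresser" (f x))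
        (PySem.Str.isIn "lab" (f x) || PySem.Str.isIn "bench" (f x) || PySem.Str.isIn "microscope" (f x))))
      none
      = pvF
        (L.any fun x => PySem.Str.isIn "refrigerator" (f x) || PySem.Str.isIn "oven" (f x) || PySem.Str.isIn "dishwasher" (f x))
        (L.any fun x => PySem.Str.isIn "washer" (f x) || PySem.Str.isIn "dryer" (f x) || PySem.Str.isIn "hamper" (f x))
        (L.any fun x => PySem.Str.isIn "pallet" (f x) || PySem.Str.isIn "racking" (f x) || PySem.Str.isIn "forklift" (f x))
        (L.any fun x => PySem.Str.isIn "bed" (f x) || PySem.Str.isIn "dresser" (f x))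
        (L.any fun x => PySem.Str.isIn "lab" (f x) || PySem.Str.isIn "bench" (f x) || PySem.Str.isIn "microscope" (f x)) := by
  induction L with
  | nil => rfl
  | cons x t ih =>
    rw [List.foldl_cons, pvFoldl_omin]
    have hz : pvOmin (none : Option (Nat × String))
        (pvF (PySem.Str.isIn "refrigerator" (f x) || PySem.Str.isIn "oven" (f x) || PySem.Str.isIn "dishwasher" (f x))
          (PySem.Str.isIn "washer" (f x) || PySem.Str.isIn "dryer" (f x) || PySem.Str.isIn "hamper" (f x))
          (PySem.Str.isIn "pallet" (f x) || PySem.Str.isIn "racking" (f x) || PySem.Str.isIn "forklift" (f x))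
          (PySem.Str.isIn "bed" (f x) || PySem.Str.isIn "dresser" (f x))
          (PySem.Str.isIn "lab" (f x) || PySem.Str.isIn "bench" (f x) || PySem.Str.isIn "microscope" (f x))) = pvF _ _ _ _ _ := rfl
    rw [hz, ih, pvOmin_F]
    simp [List.any_cons]

-- set(ids).any = ids.any (membership-only consumption of the Set).
theorem pvSet_any (L : List String) (p : String → Bool) :
    (PySem.Set.ofList L).any p = L.any p := by
  rw [Bool.eq_iff_iff]
  simp only [List.any_eq_true]
  constructor
  · rintro ⟨x, hx, hp⟩; exact ⟨x, (PySem.Set.mem_ofList _ _).1 hx, hp⟩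
  · rintro ⟨x, hx, hp⟩; exact ⟨x, (PySem.Set.mem_ofList _ _).2 hx, hp⟩

-- keyword-outer any = id-outer any (both are 'some pair matches').
theorem pvAny_swap (ks : List String) (L : List String) :
    ks.any (fun k => L.any (fun oid => PySem.Str.isIn k oid))
      = L.any (fun oid => ks.any (fun k => PySem.Str.isIn k oid)) := by
  rw [Bool.eq_iff_iff]
  simp only [List.any_eq_true]
  constructor
  · rintro ⟨k, hk, oid, ho, h⟩; exact ⟨oid, ho, k, hk, h⟩
  · rintro ⟨oid, ho, k, hk, h⟩; exact ⟨k, hk, oid, ho, h⟩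

-- B's double fold over the raw objects equals the pvF of the five groupwise anys over the mapped ids.
theorem pvBest_eq (objects : List (List (String × String))) :
    objects.foldl
      (fun best obj =>
        let oid := PySem.Str.lower ((PySem.Dict.mk obj).getD "id" "")
        pvKeywordIndex.foldl
          (fun best e =>
            if PySem.Str.isIn e.1 oid && (match best with | none => true | some b => decide (e.2.1 < b.1))
            then some e.2 else best)
          best)
      (none : Option (Nat × String))
      = pvF
        (objects.any fun obj => PySem.Str.isIn "refrigerator" (PySem.Str.lower ((PySem.Dict.mk obj).getD "id" "")) || PySem.Str.isIn "oven" (PySem.Str.lower ((PySem.Dict.mk obj).getD "id" "")) || PySem.Str.isIn "dishwasher" (PySem.Str.lower ((PySem.Dict.mk obj).getD "id" "")))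
        (objects.any fun obj => PySem.Str.isIn "washer" (PySem.Str.lower ((PySem.Dict.mk obj).getD "id" "")) || PySem.Str.isIn "dryer" (PySem.Str.lower ((PySem.Dict.mk obj).getD "id" "")) || PySem.Str.isIn "hamper" (PySem.Str.lower ((PySem.Dict.mk obj).getD "id" "")))
        (objects.any fun obj => PySem.Str.isIn "pallet" (PySem.Str.lower ((PySem.Dict.mk obj).getD "id" "")) || PySem.Str.isIn "racking" (PySem.Str.lower ((PySem.Dict.mk obj).getD "id" "")) || PySem.Str.isIn "forklift" (PySem.Str.lower ((PySem.Dict.mk obj).getD "id" "")))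
        (objects.any fun obj => PySem.Str.isIn "bed" (PySem.Str.lower ((PySem.Dict.mk obj).getD "id" "")) || PySem.Str.isIn "dresser" (PySem.Str.lower ((PySem.Dict.mk obj).getD "id" "")))
        (objects.any fun obj => PySem.Str.isIn "lab" (PySem.Str.lower ((PySem.Dict.mk obj).getD "id" "")) || PySem.Str.isIn "bench" (PySem.Str.lower ((PySem.Dict.mk obj).getD "id" "")) || PySem.Str.isIn "microscope" (PySem.Str.lower ((PySem.Dict.mk obj).getD "id" ""))) := by
  have h1 : (fun (best : Option (Nat × String)) obj =>
        let oid := PySem.Str.lower ((PySem.Dict.mk obj).getD "id" "")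
        pvKeywordIndex.foldl
          (fun best e =>
            if PySem.Str.isIn e.1 oid && (match best with | none => true | some b => decide (e.2.1 < b.1))
            then some e.2 else best)
          best)
      = fun best obj => pvOmin best (pvF
          (PySem.Str.isIn "refrigerator" (PySem.Str.lower ((PySem.Dict.mk obj).getD "id" "")) || PySem.Str.isIn "oven" (PySem.Str.lower ((PySem.Dict.mk obj).getD "id" "")) || PySem.Str.isIn "dishwasher" (PySem.Str.lower ((PySem.Dict.mk obj).getD "id" "")))
          (PySem.Str.isIn "washer" (PySem.Str.lower ((PySem.Dict.mk obj).getD "id" "")) || PySem.Str.isIn "dryer" (PySem.Str.lower ((PySem.Dict.mk obj).getD "id" "")) || PySem.Str.isIn "hamper" (PySem.Str.lower ((PySem.Dict.mk obj).getD "id" "")))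
          (PySem.Str.isIn "pallet" (PySem.Str.lower ((PySem.Dict.mk obj).getD "id" "")) || PySem.Str.isIn "racking" (PySem.Str.lower ((PySem.Dict.mk obj).getD "id" "")) || PySem.Str.isIn "forklift" (PySem.Str.lower ((PySem.Dict.mk obj).getD "id" "")))
          (PySem.Str.isIn "bed" (PySem.Str.lower ((PySem.Dict.mk obj).getD "id" "")) || PySem.Str.isIn "dresser" (PySem.Str.lower ((PySem.Dict.mk obj).getD "id" "")))
          (PySem.Str.isIn "lab" (PySem.Str.lower ((PySem.Dict.mk obj).getD "id" "")) || PySem.Str.isIn "bench" (PySem.Str.lower ((PySem.Dict.mk obj).getD "id" "")) || PySem.Str.isIn "microscope" (PySem.Str.lower ((PySem.Dict.mk obj).getD "id" "")))) :=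
    funext fun best => funext fun obj => pvInner_eq _ best
  rw [h1]
  exact pvOuter_eq (fun obj => PySem.Str.lower ((PySem.Dict.mk obj).getD "id" "")) objects

-- A's five-way chain on the group booleans = reading off pvF.
theorem pvChain_eq (b0 b1 b2 b3 b4 : Bool) :
    (if b0 then "kitchen"
     else if b1 then "home_laundry"
     else if b2 then "warehouse"
     else if b3 then "bedroom"
     else if b4 then "lab"
     else "generic")
      = (match pvF b0 b1 b2 b3 b4 with | some b => b.2 | none => "generic") := by
  revert b0 b1 b2 b3 b4; decide

-- The whole keyword-phase body of A equals the whole keyword-phase body of B.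
theorem pvBody_eq (objects : List (List (String × String))) :
    (match (objects.foldl
      (fun best obj =>
        let oid := PySem.Str.lower ((PySem.Dict.mk obj).getD "id" "")
        pvKeywordIndex.foldl
          (fun best e =>
            if PySem.Str.isIn e.1 oid && (match best with | none => true | some b => decide (e.2.1 < b.1))
            then some e.2 else best)
          best)
      (none : Option (Nat × String))) with
     | some b => b.2
     | none => "generic")
    = (let object_ids : PySem.Set String :=
        PySem.Set.ofList (objects.map (fun obj => PySem.Str.lower ((PySem.Dict.mk obj).getD "id" "")))
      if ["refrigerator", "oven", "dishwasher"].any (fun k => object_ids.any (fun oid => PySem.Str.isIn k oid)) then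
        "kitchen"
      else if ["washer", "dryer", "hamper"].any (fun k => object_ids.any (fun oid => PySem.Str.isIn k oid)) then
        "home_laundry"
      else if ["pallet", "racking", "forklift"].any (fun k => object_ids.any (fun oid => PySem.Str.isIn k oid)) then
        "warehouse"
      else if object_ids.any (fun oid => PySem.Str.isIn "bed" oid || PySem.Str.isIn "dresser" oid) then
        "bedroom"
      else if object_ids.any (fun oid => PySem.Str.isIn "lab" oid || PySem.Str.isIn "bench" oid || PySem.Str.isIn "microscope" oid) then
        "lab"
      else
        "generic") := by
  rw [pvBest_eq, ← pvChain_eq]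
  simp only [pvAny_swap]
  simp only [pvSet_any, List.any_map, Function.comp_def]
  simp only [List.any_cons, List.any_nil, Bool.or_false, Bool.or_assoc]

-- ===== VERDICT (by name: the statement is the Claim_ definition above) =====
theorem detect_environment_type_spec : Claim_equal_detect_environment_type := by
  intro scene_type inventory _
  unfold Spec_detect_environment_type detect_environment_type detect_environment_type_alt
  cases h : (PySem.Dict.mk pvScene2Env).get? (PySem.Str.strip (PySem.Str.lower scene_type)) with
  | some env => simp only [h]
  | none =>
    simp only [h]
    rw [pvBody_eq, pvChain_eq]
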